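-- pv_equiv track=rewrite | github.com/mackthompson16/harmony-take-home | src/workflow/alerts.py | priority_rank
-- ===== SOURCE A (Python) =====
-- def priority_rank(reasons: list[str]) -> int:
--     # Lower is higher queue priority (separate from failure policy).
--     rank_map = {
--         "urgent": 0,
--         "due_soon": 1,
--     }
--     if not reasons:
--         return 2
--     # Only urgent/due_soon influence priority. Everything else is fallback tier.
--     return min(rank_map.get(reason, 2) for reason in reasons)
-- ===== SOURCE B (Python) =====
-- def priority_rank(reasons: list[str]) -> int:
--     if "urgent" in reasons:
--         return 0
--     if "due_soon" in reasons:
--         return 1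
--     return 2
-- ===== Notes on version B (the rewrite author's own statement) =====
-- stated objective: idiomatic
-- what changed: Replaced the rank_map dict plus min-over-a-generator reduction by priority-ordered membership tests that short-circuit at the highest-priority label and fall through to 2 (empty list needs no special case).
import Mathlib
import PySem

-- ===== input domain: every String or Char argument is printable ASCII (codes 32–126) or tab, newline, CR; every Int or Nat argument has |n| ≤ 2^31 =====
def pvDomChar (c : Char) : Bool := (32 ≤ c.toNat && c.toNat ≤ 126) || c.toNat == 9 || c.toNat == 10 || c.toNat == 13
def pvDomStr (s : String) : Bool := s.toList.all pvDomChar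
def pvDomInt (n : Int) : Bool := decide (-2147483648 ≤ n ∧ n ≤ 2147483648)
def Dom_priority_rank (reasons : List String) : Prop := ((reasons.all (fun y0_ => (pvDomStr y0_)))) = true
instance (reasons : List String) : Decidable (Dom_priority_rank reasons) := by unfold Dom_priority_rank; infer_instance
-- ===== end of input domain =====

-- B replaces the rank_map + min-reduction by priority-ordered membership tests (idiomatic decomposition).

-- ===== PORT A =====
def priority_rank (reasons : List String) : Int :=
  let rank_map : PySem.Dict String Int := PySem.Dict.ofList [("urgent", 0), ("due_soon", 1)]
  if reasons = [] then 2
  else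
    match PySem.List.min? (reasons.map (fun reason => rank_map.getD reason 2)) (fun x => x) with
    | some m => m
    | none => 2  -- unreachable: reasons ≠ []

-- ===== PORT B =====
def priority_rank_alt (reasons : List String) : Int :=
  if reasons.contains "urgent" then 0
  else if reasons.contains "due_soon" then 1
  else 2

-- ===== PRECONDITION & SPEC =====
def Spec_priority_rank (reasons : List String) (out : Int) : Prop := out = priority_rank_alt reasons
instance (reasons : List String) (out : Int) : Decidable (Spec_priority_rank reasons out) := by unfold Spec_priority_rank; infer_instance

-- ===== CLAIM (what is proved, stated in full; the proofs are below) =====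
def Claim_equal_priority_rank : Prop := ∀ (reasons : List String), Dom_priority_rank reasons → Spec_priority_rank reasons (priority_rank reasons)

-- ===== LEMMAS AND PROOFS =====

def pvRankOf (r : String) : Int :=
  (PySem.Dict.ofList [("urgent", (0:Int)), ("due_soon", 1)]).getD r 2

lemma pvRankOf_eq (r : String) :
    pvRankOf r = if r = "urgent" then 0 else if r = "due_soon" then 1 else 2 := by
  have hd : PySem.Dict.ofList [("urgent", (0:Int)), ("due_soon", 1)]
      = PySem.Dict.mk [("urgent", 0), ("due_soon", 1)] := by decide
  by_cases h1 : r = "urgent"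
  · subst h1; decide
  by_cases h2 : r = "due_soon"
  · subst h2; decide
  simp [pvRankOf, hd, PySem.Dict.getD, PySem.Dict.get?,
    h1, h2, Ne.symm h1, Ne.symm h2]

def pvG (rs : List String) : Int :=
  if rs.contains "urgent" then 0 else if rs.contains "due_soon" then 1 else 2

lemma pvG_le_two (rs : List String) : pvG rs ≤ 2 := by
  simp only [pvG]; split_ifs <;> omega

lemma pvG_nonneg (rs : List String) : 0 ≤ pvG rs := by
  simp only [pvG]; split_ifs <;> omega

lemma pvG_cons (x : String) (t : List String) :
    pvG (x :: t) = min (pvRankOf x) (pvG t) := by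
  have ht := pvG_le_two t
  have ht0 := pvG_nonneg t
  simp only [pvG, pvRankOf_eq, List.contains_cons]
  by_cases hx : x = "urgent" <;> by_cases hy : x = "due_soon" <;>
    simp [hx, hy, min_def] <;> split_ifs <;> first | omega | simp_all [eq_comm]

lemma foldl_min_map (rs : List String) (a : Int) (ha : a ≤ 2) :
    (rs.map pvRankOf).foldl min a = min a (pvG rs) := by
  induction rs generalizing a with
  | nil => simp [pvG]; omega
  | cons x t ih =>
    have hx : pvRankOf x ≤ 2 := by rw [pvRankOf_eq]; split_ifs <;> omega
    rw [List.map_cons, List.foldl_cons, ih (min a (pvRankOf x)) (by omega), pvG_cons]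
    omega

-- ===== VERDICT (by name: the statement is the Claim_ definition above) =====
theorem priority_rank_spec : Claim_equal_priority_rank := by
  intro reasons _
  show priority_rank reasons = priority_rank_alt reasons
  cases reasons with
  | nil => rfl
  | cons r rs =>
    have hr : pvRankOf r ≤ 2 := by rw [pvRankOf_eq]; split_ifs <;> omega
    have : priority_rank_alt (r :: rs) = pvG (r :: rs) := rfl
    rw [this, pvG_cons]
    simp only [priority_rank, List.map_cons]
    rw [if_neg (by simp), PySem.List.min?_id_cons]
    show (rs.map (fun reason => pvRankOf reason)).foldl min (pvRankOf r) = _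
    simp only [show (fun reason => pvRankOf reason) = pvRankOf from rfl]
    rw [foldl_min_map rs _ hr]
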